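-- pv_equiv track=rewrite | github.com/ServiceNow/SyGra | studio/api.py | _extract_class_or_function_body
-- ===== SOURCE A (Python) =====
-- def _extract_class_or_function_body(code_content: str) -> str:
--     """
--     Extract just the class or function definition from code content,
--     removing any inline imports and docstrings that precede it.
--
--     Args:
--         code_content: Raw code that may include imports, docstrings, and class/function
--
--     Returns:
--         Clean class or function definition without preceding imports
--     """
--     lines = code_content.strip().split('\n')
--     result_lines = []
--     in_class_or_func = False
--     class_indent = 0
--
--     for i, line in enumerate(lines):
--         stripped = line.strip()
--
--         # Skip empty lines before class/function
--         if not in_class_or_func and not stripped: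
--             continue
--
--         # Skip import statements before class/function
--         if not in_class_or_func and (stripped.startswith('from ') or stripped.startswith('import ')):
--             continue
--
--         # Skip module-level docstrings (before class/function)
--         if not in_class_or_func and (stripped.startswith('"""') or stripped.startswith("'''")):
--             # Skip until closing quote
--             if stripped.count('"""') == 1 or stripped.count("'''") == 1:
--                 quote = '"""' if '"""' in stripped else "'''"
--                 for j in range(i + 1, len(lines)):
--                     if quote in lines[j]:
--                         break
--             continue
--
--         # Detect start of class or function
--         if stripped.startswith('class ') or stripped.startswith('def '):
--             in_class_or_func = True
--             class_indent = len(line) - len(line.lstrip())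
--             result_lines.append(line)
--             continue
--
--         # Once in class/function, include everything
--         if in_class_or_func:
--             result_lines.append(line)
--
--     return '\n'.join(result_lines)
-- ===== SOURCE B (Python) =====
-- def _extract_class_or_function_body(code_content: str) -> str:
--     lines = code_content.strip().split('\n')
--     for i, line in enumerate(lines):
--         stripped = line.strip()
--         if stripped.startswith('class ') or stripped.startswith('def '):
--             return '\n'.join(lines[i:])
--     return ''
-- ===== Notes on version B (the rewrite author's own statement) =====
-- stated objective: simpler
-- what changed: Replaces A's stateful skip/accumulate loop (flag, indent bookkeeping, dead docstring-scanning inner loop) with a locate-then-slice: find the first line whose strip() starts with 'class '/'def ' and join the tail from there.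
import Mathlib
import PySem

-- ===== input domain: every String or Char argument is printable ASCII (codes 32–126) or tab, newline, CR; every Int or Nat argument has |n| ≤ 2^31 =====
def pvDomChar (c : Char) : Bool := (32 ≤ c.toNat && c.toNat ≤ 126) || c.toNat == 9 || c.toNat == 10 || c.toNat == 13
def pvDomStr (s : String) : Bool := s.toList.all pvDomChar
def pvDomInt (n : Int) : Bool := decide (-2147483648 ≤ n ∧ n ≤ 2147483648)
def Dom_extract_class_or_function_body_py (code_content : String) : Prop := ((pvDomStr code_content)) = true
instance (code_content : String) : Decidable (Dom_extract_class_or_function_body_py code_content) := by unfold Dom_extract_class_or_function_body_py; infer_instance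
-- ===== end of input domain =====

-- B replaces A's stateful skip/accumulate loop with locate-first-'class '/'def '-line-then-slice (simpler).

-- ===== PORT A =====
-- the loop body of A, over the state (result_lines, in_class_or_func, class_indent).
-- Python's inner docstring scan ('for j in range(i+1, len(lines)): if quote in lines[j]: break')
-- only breaks and binds nothing, so that branch is an unchanged-state 'continue' like the others.
def pvAStep (st : List String × Bool × Int) (line : String) : List String × Bool × Int :=
  let res := st.1
  let inF := st.2.1
  let ind := st.2.2
  let stripped := PySem.Str.strip line
  if !inF && decide (stripped = "") then st
  else if !inF && (PySem.Str.startswith stripped "from " || PySem.Str.startswith stripped "import ") then st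
  else if !inF && (PySem.Str.startswith stripped "\"\"\"" || PySem.Str.startswith stripped "'''") then st
  else if PySem.Str.startswith stripped "class " || PySem.Str.startswith stripped "def " then
    (res ++ [line], true, PySem.Str.len line - PySem.Str.len (PySem.Str.lstrip line))
  else if inF then (res ++ [line], inF, ind)
  else st

def extract_class_or_function_body_py (code_content : String) : String :=
  let lines := (PySem.Str.split? (PySem.Str.strip code_content) "\n").getD []
  let st := lines.foldl pvAStep ([], false, 0)
  PySem.Str.join "\n" st.1

-- ===== PORT B =====
def pvIsDefLine (line : String) : Bool :=
  let stripped := PySem.Str.strip line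
  PySem.Str.startswith stripped "class " || PySem.Str.startswith stripped "def "

def extract_class_or_function_body_py_alt (code_content : String) : String :=
  let lines := (PySem.Str.split? (PySem.Str.strip code_content) "\n").getD []
  match lines.findIdx? pvIsDefLine with
  | some i => PySem.Str.join "\n" (PySem.List.slice lines (some (i : Int)) none)
  | none => ""

-- ===== PRECONDITION & SPEC =====
def Spec_extract_class_or_function_body_py (code_content : String) (out : String) : Prop := out = extract_class_or_function_body_py_alt code_content
instance (code_content : String) (out : String) : Decidable (Spec_extract_class_or_function_body_py code_content out) := by unfold Spec_extract_class_or_function_body_py; infer_instance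

-- ===== CLAIM (what is proved, stated in full; the proofs are below) =====
def Claim_equal_extract_class_or_function_body_py : Prop := ∀ (code_content : String), Dom_extract_class_or_function_body_py code_content → Spec_extract_class_or_function_body_py code_content (extract_class_or_function_body_py code_content)

-- ===== LEMMAS AND PROOFS =====

-- a line starting (after strip) with 'class '/'def ' is nonempty and starts with none of the skipped prefixes
theorem pvDef_aux (s : List Char)
    (h : (PySem.Chars.startswith s ['c','l','a','s','s',' '] || PySem.Chars.startswith s ['d','e','f',' ']) = true) :
    s ≠ [] ∧ PySem.Chars.startswith s ['f','r','o','m',' '] = false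
      ∧ PySem.Chars.startswith s ['i','m','p','o','r','t',' '] = false
      ∧ PySem.Chars.startswith s ['\"','\"','\"'] = false
      ∧ PySem.Chars.startswith s ['\'','\'','\''] = false := by
  rcases Bool.or_eq_true_iff.mp h with h | h <;>
  · obtain ⟨t, rfl⟩ := (PySem.Chars.startswith_iff _ _).mp h
    simp [PySem.Chars.startswith, List.isPrefixOf]

-- a 'class '/'def ' line always switches to (res ++ [line], True, indent)
theorem pvAStep_defline (res : List String) (inF : Bool) (ind : Int) (l : String)
    (h : pvIsDefLine l = true) :
    pvAStep (res, inF, ind) l =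
      (res ++ [l], true, PySem.Str.len l - PySem.Str.len (PySem.Str.lstrip l)) := by
  simp only [pvIsDefLine, PySem.Str.startswith_eq, PySem.Str.toList_strip] at h
  obtain ⟨hne, h1, h2, h3, h4⟩ := pvDef_aux _ h
  have hs : ¬ (PySem.Str.strip l = "") := by
    intro e
    apply hne
    have := congrArg String.toList e
    simpa [PySem.Str.toList_strip] using this
  simp only [show "class ".toList = ['c','l','a','s','s',' '] from rfl,
    show "def ".toList = ['d','e','f',' '] from rfl] at h
  rcases Bool.or_eq_true_iff.mp h with hc | hc <;>
    simp [pvAStep, PySem.Str.startswith_eq, PySem.Str.toList_strip, hs, h1, h2, h3, h4, hc]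

-- before any 'class '/'def ' line, every line leaves the initial state unchanged
theorem pvAStep_skip (l : String) (h : pvIsDefLine l = false) :
    pvAStep ([], false, 0) l = ([], false, 0) := by
  simp only [pvIsDefLine, Bool.or_eq_false_iff] at h
  simp only [pvAStep]
  split_ifs with h1 h2 h3 h4 <;> simp_all

-- once in_class_or_func is set, every remaining line is appended
theorem pvA_in_phase (rest : List String) : ∀ (res : List String) (ind : Int),
    (rest.foldl pvAStep (res, true, ind)).1 = res ++ rest := by
  induction rest with
  | nil => intro res ind; simp
  | cons l rest ih =>
    intro res ind
    simp only [List.foldl_cons]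
    by_cases h : pvIsDefLine l = true
    · rw [pvAStep_defline res true _ l h, ih]; simp
    · have h' : pvIsDefLine l = false := by simpa using h
      simp only [pvIsDefLine, Bool.or_eq_false_iff] at h'
      have hstep : pvAStep (res, true, ind) l = (res ++ [l], true, ind) := by
        simp only [pvAStep]
        split_ifs with h1 h2 h3 h4 <;> simp_all
      rw [hstep, ih]; simp

-- A's accumulated result_lines is the tail of lines from the first 'class '/'def ' line
theorem pvA_main (lines : List String) :
    (lines.foldl pvAStep ([], false, 0)).1 =
      (match lines.findIdx? pvIsDefLine with
       | some i => lines.drop i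
       | none => []) := by
  induction lines with
  | nil => simp
  | cons l rest ih =>
    by_cases h : pvIsDefLine l = true
    · simp only [List.foldl_cons, List.findIdx?_cons, h]
      rw [pvAStep_defline [] false 0 l h, pvA_in_phase]
      simp
    · have h' : pvIsDefLine l = false := by simpa using h
      simp only [List.foldl_cons, List.findIdx?_cons, h', pvAStep_skip l h', ih]
      cases hf : rest.findIdx? pvIsDefLine <;> simp

-- ===== VERDICT (by name: the statement is the Claim_ definition above) =====
theorem extract_class_or_function_body_py_spec : Claim_equal_extract_class_or_function_body_py := by
  intro code_content _
  unfold Spec_extract_class_or_function_body_py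
  unfold extract_class_or_function_body_py extract_class_or_function_body_py_alt
  simp only [pvA_main]
  cases hf : ((PySem.Str.split? (PySem.Str.strip code_content) "\n").getD []).findIdx? pvIsDefLine with
  | none => simp [PySem.Str.join, PySem.Chars.join, List.intercalate]
  | some i => simp [PySem.List.slice_from_natCast]
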